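-- pv_equiv track=rewrite | github.com/grasshopperTrainer/coding_practice | baekjoon/accepted/14725 개미굴.py | solution
-- ===== SOURCE A (Python) =====
-- def solution(queries):
--     ROOT = 'R'
--     tree = {ROOT:{}}
--     for query in queries:
--         root = tree[ROOT]
--         for c in query:
--             root = root.setdefault(c, {})
--
--     def dfs(at, root, depth):
--         result = ['-'*2*depth + at]
--         for k, v in sorted(root.items()):
--             result += dfs(k, v, depth+1)
--         return result
--
--     return dfs(ROOT, tree['R'], -1)[1:]
--
-- queries = []
-- ===== SOURCE B (Python) =====
-- def solution(queries):
--     prefixes = {tuple(q[:i + 1]) for q in queries for i in range(len(q))}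
--     return ['--' * (len(p) - 1) + p[-1] for p in sorted(prefixes)]
-- ===== Notes on version B (the rewrite author's own statement) =====
-- stated objective: simpler
-- what changed: B drops the explicit nested-dict trie and the recursive DFS entirely: it collects the set of all non-empty prefixes of the queries, sorts them lexicographically (tuple order = the trie's sorted pre-order), and renders each prefix as '--'*(len-1) + last token.
import Mathlib
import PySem

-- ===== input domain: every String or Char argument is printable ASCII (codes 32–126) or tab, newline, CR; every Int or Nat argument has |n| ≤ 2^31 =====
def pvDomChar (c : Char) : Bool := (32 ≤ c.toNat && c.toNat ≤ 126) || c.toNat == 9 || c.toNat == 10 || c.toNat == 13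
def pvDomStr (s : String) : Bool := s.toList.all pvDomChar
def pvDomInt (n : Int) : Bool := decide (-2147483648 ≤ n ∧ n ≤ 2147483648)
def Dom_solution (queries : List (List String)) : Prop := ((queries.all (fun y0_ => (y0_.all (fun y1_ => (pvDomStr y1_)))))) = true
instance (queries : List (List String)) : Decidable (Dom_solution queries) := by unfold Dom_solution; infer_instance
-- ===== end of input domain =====

-- B replaces A's explicit trie + recursive DFS by "collect all non-empty prefixes,
-- sort them, render each" (objective: simpler); equal return value proved below.

-- Python's  s * n  (string repetition; n ≤ 0 gives ""); shared by both ports.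
def strRep (s : String) (n : Int) : String :=
  String.ofList ((List.replicate n.toNat s.toList).flatten)

-- ===== PORT A =====
-- The nested dicts {token: {…}} of A become a first-child/next-sibling trie:
-- `cons k child sib` is the assoc list (k, child) :: sib in insertion order.
inductive TrieL where
  | nil : TrieL
  | cons : String → TrieL → TrieL → TrieL
deriving DecidableEq, Repr

def TrieL.toPairs : TrieL → List (String × TrieL)
  | .nil => []
  | .cons k v r => (k, v) :: r.toPairs

-- termination helper for dfs (and for pathsL in the proofs below)
theorem TrieL.sizeOf_lt_of_mem_toPairs : ∀ {t : TrieL} {kv : String × TrieL},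
    kv ∈ t.toPairs → sizeOf kv.2 < sizeOf t := by
  intro t
  induction t with
  | nil => intro kv h; simp [TrieL.toPairs] at h
  | cons k v r ihv ihr =>
    intro kv h
    simp only [TrieL.toPairs, List.mem_cons] at h
    rcases h with h | h
    · subst h; simp; omega
    · have := ihr h; simp; omega

-- the inner loop `root = root.setdefault(c, {})` run over one query:
-- scan the sibling list for c (dict lookup), descend; a missing key is appended.
def insT : TrieL → List String → TrieL
  | t, [] => t
  | .nil, c :: rest => .cons c (insT .nil rest) .nil
  | .cons k v r, c :: rest =>
      if k = c then .cons k (insT v rest) r else .cons k v (insT r (c :: rest))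
termination_by t q => (q.length, sizeOf t)

-- dfs: `'-'*2*depth` is ('-'*2)*depth; sorted(root.items()) compares (key, value)
-- tuples left to right and the keys of one dict are distinct, so it sorts by key;
-- the loop `result += dfs(k, v, depth+1)` over the sorted items is the flatMap.
def dfs (at_ : String) (root : TrieL) (depth : Int) : List String :=
  (strRep (strRep "-" 2) depth ++ at_) ::
    (PySem.List.sorted root.toPairs (fun kv => kv.1)).attach.flatMap
      (fun x => dfs x.1.1 x.1.2 (depth + 1))
termination_by sizeOf root
decreasing_by
  exact TrieL.sizeOf_lt_of_mem_toPairs ((PySem.List.mem_sorted _ _ _ _).mp x.2)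

def solution (queries : List (List String)) : List String :=
  PySem.List.slice
    (dfs "R" (queries.foldl (fun t q => insT t q) TrieL.nil) (-1))
    (some 1) none

-- ===== PORT B =====
-- Source B: prefixes = {tuple(q[:i+1]) for q in queries for i in range(len(q))}
--       return ['--' * (len(p) - 1) + p[-1] for p in sorted(prefixes)]
-- (every p in the set is non-empty, so p[-1] never raises; getD's default is dead)
def solution_alt (queries : List (List String)) : List String :=
  (PySem.List.sorted
      (PySem.Set.ofList (queries.flatMap (fun q =>
        (PySem.List.pyRange 0 (q.length : Int)).map
          (fun i => PySem.List.slice q none (some (i + 1))))))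
      (fun p => p)).map
    (fun p => strRep "--" ((p.length : Int) - 1) ++ (PySem.List.pyGet? p (-1)).getD "")

-- ===== PRECONDITION & SPEC =====
def Spec_solution (queries : List (List String)) (out : List String) : Prop := out = solution_alt queries
instance (queries : List (List String)) (out : List String) : Decidable (Spec_solution queries out) := by unfold Spec_solution; infer_instance

-- ===== CLAIM (what is proved, stated in full; the proofs are below) =====
def Claim_equal_solution : Prop := ∀ (queries : List (List String)), Dom_solution queries → Spec_solution queries (solution queries)

-- ===== LEMMAS AND PROOFS =====

-- all root-to-node paths of the trie, children in sorted-key order (DFS order)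
def pathsL (t : TrieL) : List (List String) :=
  (PySem.List.sorted t.toPairs (fun kv => kv.1)).attach.flatMap
    (fun x => [x.1.1] :: (pathsL x.1.2).map (x.1.1 :: ·))
termination_by sizeOf t
decreasing_by
  exact TrieL.sizeOf_lt_of_mem_toPairs ((PySem.List.mem_sorted _ _ _ _).mp x.2)

-- the sorted-children flatMap inside dfs, as a named function
def kidsA (t : TrieL) (depth : Int) : List String :=
  (PySem.List.sorted t.toPairs (fun kv => kv.1)).flatMap (fun kv => dfs kv.1 kv.2 depth)

-- rendering of a path p (≠ []) whose last node sits at nesting depth d + (|p| - 1)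
def renderAt (d : Nat) (p : List String) : String :=
  strRep "--" ((d : Int) + ((p.length : Int) - 1)) ++ (PySem.List.pyGet? p (-1)).getD ""

theorem flatMap_attach {α β : Type} (l : List α) (f : α → List β) :
    l.attach.flatMap (fun x => f x.1) = l.flatMap f := by
  conv_rhs => rw [← List.attach_map_subtype_val l]
  rw [List.flatMap_map]

theorem flatMap_congr_mem {α β : Type} {l : List α} {f g : α → List β}
    (h : ∀ a ∈ l, f a = g a) : l.flatMap f = l.flatMap g := by
  simp only [List.flatMap_def]; rw [List.map_congr_left h]

theorem strRep_two (m : Int) : strRep (strRep "-" 2) m = strRep "--" m := by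
  have h : strRep "-" 2 = "--" := by decide
  rw [h]

theorem dfs_eq (k : String) (v : TrieL) (d : Int) :
    dfs k v d = (strRep "--" d ++ k) :: kidsA v (d + 1) := by
  rw [dfs, strRep_two, kidsA]
  congr 1
  exact flatMap_attach _ (fun kv : String × TrieL => dfs kv.1 kv.2 (d + 1))

theorem pathsL_eq (t : TrieL) :
    pathsL t = (PySem.List.sorted t.toPairs (fun kv => kv.1)).flatMap
      (fun kv => [kv.1] :: (pathsL kv.2).map (kv.1 :: ·)) := by
  rw [pathsL]
  exact flatMap_attach _ (fun kv : String × TrieL => [kv.1] :: (pathsL kv.2).map (kv.1 :: ·))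

theorem pathsL_nil : pathsL TrieL.nil = [] := by
  rw [pathsL_eq]
  have h : PySem.List.sorted (TrieL.toPairs .nil) (fun kv => kv.1) = [] := by
    simp [TrieL.toPairs, PySem.List.sorted_eq_nil_iff]
  rw [h]
  rfl

theorem pathsL_ne_nil {t : TrieL} {p : List String} (h : p ∈ pathsL t) : p ≠ [] := by
  rw [pathsL_eq] at h
  simp only [List.mem_flatMap] at h
  obtain ⟨kv, -, hp⟩ := h
  rcases List.mem_cons.mp hp with h1 | h1
  · subst h1; simp
  · obtain ⟨p', -, rfl⟩ := List.mem_map.mp h1; simp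

theorem mem_pathsL {t : TrieL} {p : List String} :
    p ∈ pathsL t ↔ ∃ kv ∈ t.toPairs, p = [kv.1] ∨ ∃ p', p = kv.1 :: p' ∧ p' ∈ pathsL kv.2 := by
  rw [pathsL_eq]
  simp only [List.mem_flatMap, PySem.List.mem_sorted, List.mem_cons, List.mem_map]
  constructor
  · rintro ⟨kv, hkv, (rfl | ⟨p', hp', rfl⟩)⟩
    · exact ⟨kv, hkv, Or.inl rfl⟩
    · exact ⟨kv, hkv, Or.inr ⟨p', rfl, hp'⟩⟩
  · rintro ⟨kv, hkv, (rfl | ⟨p', rfl, hp'⟩)⟩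
    · exact ⟨kv, hkv, Or.inl rfl⟩
    · exact ⟨kv, hkv, Or.inr ⟨p', hp', rfl⟩⟩

theorem mem_pathsL_cons {k : String} {v r : TrieL} {p : List String} :
    p ∈ pathsL (TrieL.cons k v r) ↔
      ((p = [k] ∨ ∃ p', p = k :: p' ∧ p' ∈ pathsL v) ∨ p ∈ pathsL r) := by
  rw [mem_pathsL]
  simp only [TrieL.toPairs, List.mem_cons]
  constructor
  · rintro ⟨kv, (rfl | hkv), hblk⟩
    · exact Or.inl hblk
    · exact Or.inr (mem_pathsL.mpr ⟨kv, hkv, hblk⟩)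
  · rintro (hb | hr)
    · exact ⟨(k, v), Or.inl rfl, hb⟩
    · obtain ⟨kv, hkv, hblk⟩ := mem_pathsL.mp hr
      exact ⟨kv, Or.inr hkv, hblk⟩

theorem prefix_cons_char {c : String} {rest p : List String} :
    (p ≠ [] ∧ p <+: (c :: rest)) ↔ ∃ p', p = c :: p' ∧ p' <+: rest := by
  cases p with
  | nil => simp
  | cons a as =>
    constructor
    · rintro ⟨-, h⟩
      rw [List.cons_prefix_cons] at h
      exact ⟨as, by rw [h.1], h.2⟩
    · rintro ⟨p', hp, hpre⟩
      injection hp with h1 h2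
      subst h1; subst h2
      exact ⟨by simp, List.cons_prefix_cons.mpr ⟨rfl, hpre⟩⟩

theorem mem_pathsL_insT : ∀ (t : TrieL) (q : List String), ∀ (p : List String),
    p ∈ pathsL (insT t q) ↔ p ∈ pathsL t ∨ (p ≠ [] ∧ p <+: q) := by
  intro t q
  induction t, q using insT.induct with
  | case1 t =>
    intro p
    simp [insT, List.prefix_nil]
  | case2 c rest ih =>
    intro p
    simp only [insT]
    rw [mem_pathsL_cons, prefix_cons_char]
    simp only [pathsL_nil, List.not_mem_nil, or_false, false_or]
    constructor
    · rintro (rfl | ⟨p', rfl, hp'⟩)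
      · exact ⟨[], rfl, List.nil_prefix⟩
      · rcases (ih p').mp hp' with h | ⟨-, hpre⟩
        · rw [pathsL_nil] at h; simp at h
        · exact ⟨p', rfl, hpre⟩
    · rintro ⟨p', rfl, hpre⟩
      cases p' with
      | nil => exact Or.inl rfl
      | cons a as => exact Or.inr ⟨a :: as, rfl, (ih _).mpr (Or.inr ⟨by simp, hpre⟩)⟩
  | case3 v r c rest ih =>
    intro p
    rw [show insT (TrieL.cons c v r) (c :: rest) = TrieL.cons c (insT v rest) r from by
      simp [insT]]
    rw [mem_pathsL_cons, mem_pathsL_cons, prefix_cons_char]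
    constructor
    · rintro ((rfl | ⟨p', rfl, hp'⟩) | hr)
      · exact Or.inl (Or.inl (Or.inl rfl))
      · rcases (ih p').mp hp' with hv | ⟨-, hpre⟩
        · exact Or.inl (Or.inl (Or.inr ⟨p', rfl, hv⟩))
        · exact Or.inr ⟨p', rfl, hpre⟩
      · exact Or.inl (Or.inr hr)
    · rintro (((rfl | ⟨p', rfl, hv⟩) | hr) | ⟨p', rfl, hpre⟩)
      · exact Or.inl (Or.inl rfl)
      · exact Or.inl (Or.inr ⟨p', rfl, (ih p').mpr (Or.inl hv)⟩)
      · exact Or.inr hr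
      · cases p' with
        | nil => exact Or.inl (Or.inl rfl)
        | cons a as =>
          exact Or.inl (Or.inr ⟨a :: as, rfl, (ih _).mpr (Or.inr ⟨by simp, hpre⟩)⟩)
  | case4 k v r c rest hk ih =>
    intro p
    simp only [insT, if_neg hk]
    rw [mem_pathsL_cons, mem_pathsL_cons, ih p]
    exact or_assoc.symm

-- ==== well-formedness (distinct keys at each level), preserved by insertion ====
def keyMemT (c : String) : TrieL → Bool
  | .nil => false
  | .cons k _ r => c == k || keyMemT c r

def WFT : TrieL → Bool
  | .nil => true
  | .cons k v r => !keyMemT k r && WFT v && WFT r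

theorem keyMemT_nil (c : String) : keyMemT c .nil = false := rfl

theorem keyMemT_cons (c k : String) (v r : TrieL) :
    keyMemT c (.cons k v r) = (c == k || keyMemT c r) := rfl

theorem WFT_nil : WFT .nil = true := rfl

theorem WFT_cons (k : String) (v r : TrieL) :
    WFT (.cons k v r) = (!keyMemT k r && WFT v && WFT r) := rfl

theorem keyMemT_insT (x c : String) (rest : List String) : ∀ (t : TrieL),
    keyMemT x (insT t (c :: rest)) = (x == c || keyMemT x t) := by
  intro t
  induction t with
  | nil => simp [insT, keyMemT]
  | cons k v r ihv ihr =>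
    by_cases hk : k = c
    · subst hk
      cases h : x == k <;> simp [insT, keyMemT_cons, h]
    · cases h1 : x == k <;> cases h2 : x == c <;>
        simp [insT, if_neg hk, keyMemT_cons, ihr, h1, h2]

theorem WFT_insT : ∀ (t : TrieL) (q : List String), WFT t = true → WFT (insT t q) = true := by
  intro t q
  induction t, q using insT.induct with
  | case1 t => intro h; simpa [insT]
  | case2 c rest ih =>
    intro _
    simp [insT, WFT_cons, WFT_nil, keyMemT_nil]
    exact ih rfl
  | case3 v r c rest ih =>
    intro hw
    simp only [WFT_cons, Bool.and_eq_true, Bool.not_eq_true'] at hw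
    rw [show insT (TrieL.cons c v r) (c :: rest) = TrieL.cons c (insT v rest) r from by
      simp [insT]]
    simp only [WFT_cons, Bool.and_eq_true, Bool.not_eq_true']
    exact ⟨⟨hw.1.1, ih hw.1.2⟩, hw.2⟩
  | case4 k v r c rest hk ih =>
    intro hw
    simp only [WFT_cons, Bool.and_eq_true, Bool.not_eq_true'] at hw
    simp only [insT, if_neg hk, WFT_cons, Bool.and_eq_true, Bool.not_eq_true']
    refine ⟨⟨?_, hw.1.2⟩, ih hw.2⟩
    rw [keyMemT_insT]
    simp [hk, hw.1.1]

theorem WFT_child : ∀ {t : TrieL} {kv : String × TrieL}, WFT t = true → kv ∈ t.toPairs →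
    WFT kv.2 = true := by
  intro t
  induction t with
  | nil => intro kv _ hm; simp [TrieL.toPairs] at hm
  | cons k v r ihv ihr =>
    intro kv h hm
    simp only [WFT_cons, Bool.and_eq_true] at h
    simp only [TrieL.toPairs, List.mem_cons] at hm
    rcases hm with rfl | hm
    · exact h.1.2
    · exact ihr h.2 hm

theorem keyMemT_eq_true_iff (c : String) : ∀ (t : TrieL),
    keyMemT c t = true ↔ ∃ kv ∈ t.toPairs, c = kv.1 := by
  intro t
  induction t with
  | nil => simp [keyMemT_nil, TrieL.toPairs]
  | cons k v r ihv ihr =>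
    simp only [keyMemT_cons, TrieL.toPairs, List.mem_cons, Bool.or_eq_true, beq_iff_eq, ihr]
    constructor
    · rintro (h | ⟨kv, hkv, h⟩)
      · exact ⟨(k, v), Or.inl rfl, h⟩
      · exact ⟨kv, Or.inr hkv, h⟩
    · rintro ⟨kv, (rfl | hkv), h2⟩
      · exact Or.inl h2
      · exact Or.inr ⟨kv, hkv, h2⟩

theorem pairwise_ne_toPairs : ∀ {t : TrieL}, WFT t = true →
    t.toPairs.Pairwise (fun a b => a.1 ≠ b.1) := by
  intro t
  induction t with
  | nil => intro _; simp [TrieL.toPairs]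
  | cons k v r ihv ihr =>
    intro h
    simp only [WFT_cons, Bool.and_eq_true, Bool.not_eq_true'] at h
    simp only [TrieL.toPairs]
    refine List.Pairwise.cons ?_ (ihr h.2)
    intro b hb heq
    have ht := (keyMemT_eq_true_iff k r).mpr ⟨b, hb, heq⟩
    rw [h.1.1] at ht
    simp at ht

-- ==== lexicographic order facts on List String ====
theorem lex_singleton_lt {k : String} {p : List String} (h : p ≠ []) : [k] < k :: p := by
  refine List.cons_lt_cons_iff.mpr (Or.inr ⟨rfl, ?_⟩)
  cases p with
  | nil => exact absurd rfl h
  | cons a as => exact List.nil_lt_cons a as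

theorem lex_cons_lt_cons {k : String} {p q : List String} (h : p < q) : k :: p < k :: q :=
  List.cons_lt_cons_iff.mpr (Or.inr ⟨rfl, h⟩)

theorem lex_lt_of_head_lt {k k' : String} {p q : List String} (h : k < k') : k :: p < k' :: q :=
  List.cons_lt_cons_iff.mpr (Or.inl h)

theorem pathsL_pairwise_aux : ∀ (n : Nat) (t : TrieL), sizeOf t ≤ n → WFT t = true →
    (pathsL t).Pairwise (· < ·) := by
  intro n
  induction n with
  | zero => intro t ht _; exfalso; cases t <;> simp at ht
  | succ n ih =>
    intro t ht hw
    rw [pathsL_eq, List.pairwise_flatMap]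
    constructor
    · intro kv hkv
      have hmem := (PySem.List.mem_sorted _ _ _ _).mp hkv
      have hsz : sizeOf kv.2 ≤ n := by
        have := TrieL.sizeOf_lt_of_mem_toPairs hmem; omega
      have hwv := WFT_child hw hmem
      refine List.Pairwise.cons ?_ ?_
      · intro y hy
        obtain ⟨p, hp, rfl⟩ := List.mem_map.mp hy
        exact lex_singleton_lt (pathsL_ne_nil hp)
      · exact List.pairwise_map.mpr
          ((ih kv.2 hsz hwv).imp (fun h => lex_cons_lt_cons h))
    · have hle := PySem.List.sorted_pairwise t.toPairs (fun kv => kv.1)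
      have hperm := PySem.List.sorted_perm t.toPairs (fun kv => kv.1) false
      have hne : (PySem.List.sorted t.toPairs (fun kv => kv.1)).Pairwise
          (fun a b => a.1 ≠ b.1) :=
        (List.Perm.pairwise_iff (fun h => h.symm) hperm).mpr (pairwise_ne_toPairs hw)
      have hlt := (hle.and hne).imp (fun h => lt_of_le_of_ne h.1 h.2)
      refine hlt.imp ?_
      intro a b hab x hx y hy
      rcases List.mem_cons.mp hx with rfl | hx'
      · rcases List.mem_cons.mp hy with rfl | hy'
        · exact lex_lt_of_head_lt hab
        · obtain ⟨p, -, rfl⟩ := List.mem_map.mp hy'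
          exact lex_lt_of_head_lt hab
      · obtain ⟨p, -, rfl⟩ := List.mem_map.mp hx'
        rcases List.mem_cons.mp hy with rfl | hy'
        · exact lex_lt_of_head_lt hab
        · obtain ⟨q', -, rfl⟩ := List.mem_map.mp hy'
          exact lex_lt_of_head_lt hab

-- ==== A's dfs output = rendered paths ====
theorem renderAt_cons (d : Nat) (k : String) (p : List String) (h : p ≠ []) :
    renderAt d (k :: p) = renderAt (d + 1) p := by
  unfold renderAt
  congr 1
  · congr 1
    simp only [List.length_cons]
    push_cast
    ring
  · rw [PySem.List.pyGet?_neg_one, PySem.List.pyGet?_neg_one]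
    cases p with
    | nil => exact absurd rfl h
    | cons a as => rw [List.getLast?_cons_cons]

theorem kidsA_eq_map_render : ∀ (n : Nat) (t : TrieL), sizeOf t ≤ n → ∀ (d : Nat),
    kidsA t (d : Int) = (pathsL t).map (renderAt d) := by
  intro n
  induction n with
  | zero => intro t ht; exfalso; cases t <;> simp at ht
  | succ n ih =>
    intro t ht d
    rw [kidsA, pathsL_eq, List.map_flatMap]
    apply flatMap_congr_mem
    intro kv hkv
    have hmem := (PySem.List.mem_sorted _ _ _ _).mp hkv
    have hsz : sizeOf kv.2 ≤ n := by
      have := TrieL.sizeOf_lt_of_mem_toPairs hmem; omega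
    rw [dfs_eq]
    simp only [List.map_cons, List.map_map]
    have hhead : renderAt d [kv.1] = strRep "--" (d : Int) ++ kv.1 := by
      unfold renderAt
      rw [PySem.List.pyGet?_neg_one]
      norm_num
    rw [hhead]
    congr 1
    have hcast : ((d : Int) + 1) = ((d + 1 : Nat) : Int) := by push_cast; ring
    rw [hcast, ih kv.2 hsz (d + 1)]
    apply List.map_congr_left
    intro p hp
    simp only [Function.comp_apply]
    exact (renderAt_cons d kv.1 p (pathsL_ne_nil hp)).symm

-- ==== B's prefix set = paths of the trie ====
theorem WFT_foldl : ∀ (qs : List (List String)) (t : TrieL), WFT t = true →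
    WFT (qs.foldl (fun t q => insT t q) t) = true := by
  intro qs
  induction qs with
  | nil => intro t h; simpa
  | cons q qs ih =>
    intro t h
    simp only [List.foldl_cons]
    exact ih _ (WFT_insT _ _ h)

theorem mem_pathsL_foldl : ∀ (qs : List (List String)) (t : TrieL) (p : List String),
    p ∈ pathsL (qs.foldl (fun t q => insT t q) t) ↔
      p ∈ pathsL t ∨ ∃ q ∈ qs, p ≠ [] ∧ p <+: q := by
  intro qs
  induction qs with
  | nil => intro t p; simp
  | cons q qs ih =>
    intro t p
    simp only [List.foldl_cons]
    rw [ih, mem_pathsL_insT]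
    simp only [List.mem_cons]
    constructor
    · rintro ((h | h) | ⟨q', hq', h⟩)
      · exact Or.inl h
      · exact Or.inr ⟨q, Or.inl rfl, h⟩
      · exact Or.inr ⟨q', Or.inr hq', h⟩
    · rintro (h | ⟨q', (rfl | hq'), h⟩)
      · exact Or.inl (Or.inl h)
      · exact Or.inl (Or.inr h)
      · exact Or.inr ⟨q', hq', h⟩

theorem prefix_iff_slice (q p : List String) :
    (∃ i ∈ PySem.List.pyRange 0 (q.length : Int),
        PySem.List.slice q none (some (i + 1)) = p) ↔ (p ≠ [] ∧ p <+: q) := by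
  constructor
  · rintro ⟨i, hi, rfl⟩
    rw [PySem.List.mem_pyRange_one] at hi
    rw [PySem.List.slice_to _ (by omega)]
    have h1 : (i + 1).toNat = i.toNat + 1 := by omega
    constructor
    · intro hnil
      rcases List.take_eq_nil_iff.mp hnil with h | rfl
      · omega
      · simp only [List.length_nil, Nat.cast_zero] at hi
        omega
    · exact List.take_prefix _ _
  · rintro ⟨hne, hpre⟩
    have hlen : 0 < p.length := List.length_pos_iff.mpr hne
    have hle := hpre.length_le
    refine ⟨(p.length : Int) - 1, ?_, ?_⟩
    · rw [PySem.List.mem_pyRange_one]; omega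
    · rw [PySem.List.slice_to _ (by omega)]
      have h2 : ((p.length : Int) - 1 + 1).toNat = p.length := by omega
      rw [h2]
      exact (List.prefix_iff_eq_take.mp hpre).symm

theorem sorted_prefixes_eq_pathsL (qs : List (List String)) :
    PySem.List.sorted
      (PySem.Set.ofList (qs.flatMap (fun q =>
        (PySem.List.pyRange 0 (q.length : Int)).map
          (fun i => PySem.List.slice q none (some (i + 1))))))
      (fun p => p)
      = pathsL (qs.foldl (fun t q => insT t q) TrieL.nil) := by
  have hwf : WFT (qs.foldl (fun t q => insT t q) TrieL.nil) = true := WFT_foldl qs TrieL.nil rfl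
  have hpw := pathsL_pairwise_aux (sizeOf (qs.foldl (fun t q => insT t q) TrieL.nil)) _ le_rfl hwf
  have hnodup : (pathsL (qs.foldl (fun t q => insT t q) TrieL.nil)).Nodup :=
    hpw.imp (fun h => ne_of_lt h)
  have hmem : ∀ p, p ∈ pathsL (qs.foldl (fun t q => insT t q) TrieL.nil) ↔
      p ∈ PySem.Set.ofList (qs.flatMap (fun q =>
        (PySem.List.pyRange 0 (q.length : Int)).map
          (fun i => PySem.List.slice q none (some (i + 1))))) := by
    intro p
    rw [mem_pathsL_foldl, pathsL_nil, PySem.Set.mem_ofList]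
    simp only [List.not_mem_nil, false_or, List.mem_flatMap, List.mem_map]
    exact Iff.symm (exists_congr fun q => and_congr_right fun _ => prefix_iff_slice q p)
  have hperm : (pathsL (qs.foldl (fun t q => insT t q) TrieL.nil)).Perm
      (PySem.Set.ofList (qs.flatMap (fun q =>
        (PySem.List.pyRange 0 (q.length : Int)).map
          (fun i => PySem.List.slice q none (some (i + 1)))))) :=
    (List.perm_ext_iff_of_nodup hnodup (PySem.Set.nodup_ofList _)).mpr hmem
  have hde : (fun (a b : List String) => a.decidableLT b) =
      @LinearOrder.toDecidableLT (List String) List.instLinearOrder := by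
    funext a b
    exact Subsingleton.elim _ _
  rw [hde]
  exact PySem.List.sorted_eq_of_perm_of_pairwise_lt _ _ _ hperm hpw

-- ===== VERDICT (by name: the statement is the Claim_ definition above) =====
theorem solution_spec : Claim_equal_solution := by
  intro qs _
  show solution qs = solution_alt qs
  unfold solution solution_alt
  rw [dfs_eq, PySem.List.slice_from _ (by norm_num)]
  norm_num
  have h0 := kidsA_eq_map_render
    (sizeOf (qs.foldl (fun t q => insT t q) TrieL.nil)) _ le_rfl 0
  norm_num at h0
  rw [h0, sorted_prefixes_eq_pathsL]
  apply List.map_congr_left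
  intro p hp
  unfold renderAt
  congr 2
  push_cast
  ring
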